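-- pv_equiv track=rewrite | github.com/AlexJawhari/SQL-Library-Project | Milestone1/normalize.py | detect_borrower_mapping
-- ===== SOURCE A (Python) =====
-- def detect_borrower_mapping(headers):
--     """
--     Map borrower columns to required output: card_id, ssn, bname, address, phone.
--     Uses header name test, otherwise falls back to positional mapping.
--     """
--     mapping = {'card_id': None, 'ssn': None, 'bname': None, 'address': None, 'phone': None}
--     for h in headers:
--         hl = h.lower()
--         if mapping['card_id'] is None and ('card' in hl or hl == 'id' or 'id0' in hl):
--             mapping['card_id'] = h
--         if mapping['ssn'] is None and 'ssn' in hl: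
--             mapping['ssn'] = h
--         if mapping['bname'] is None and ('name' in hl or 'first_name' in hl or 'last_name' in hl):
--             mapping['bname'] = h
--         if mapping['address'] is None and ('address' in hl or 'addr' in hl):
--             mapping['address'] = h
--         if mapping['phone'] is None and ('phone' in hl or 'tel' in hl):
--             mapping['phone'] = h
--
--     # fallback positional
--     if mapping['card_id'] is None and len(headers) > 0:
--         mapping['card_id'] = headers[0]
--     if mapping['ssn'] is None and len(headers) > 1:
--         mapping['ssn'] = headers[1]
--     if mapping['bname'] is None and len(headers) > 2:
--         mapping['bname'] = headers[2]
--     if mapping['address'] is None and len(headers) > 3: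
--         mapping['address'] = headers[3]
--     if mapping['phone'] is None and len(headers) > 4:
--         mapping['phone'] = headers[4]
--
--     return mapping
-- ===== SOURCE B (Python) =====
-- def detect_borrower_mapping(headers):
--     """
--     Map borrower columns to required output: card_id, ssn, bname, address, phone.
--     Field-major: per field, first header matching its keyword test, else positional fallback.
--     """
--     fields = [
--         ('card_id', lambda hl: 'card' in hl or hl == 'id' or 'id0' in hl, 0),
--         ('ssn',     lambda hl: 'ssn' in hl,                               1),
--         ('bname',   lambda hl: 'name' in hl,                              2),
--         ('address', lambda hl: 'addr' in hl,                              3),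
--         ('phone',   lambda hl: 'phone' in hl or 'tel' in hl,              4),
--     ]
--     return {f: next((h for h in headers if p(h.lower())),
--                     headers[i] if len(headers) > i else None)
--             for f, p, i in fields}
-- ===== Notes on version B (the rewrite author's own statement) =====
-- stated objective: simpler
-- what changed: Replaces A's header-major stateful loop over a 5-key dict plus separate positional-fallback block by a field-major table (field, predicate, fallback index): each field is the first matching header or the positional fallback, in one dict comprehension; redundant keyword tests ('first_name'/'last_name' subsumed by 'name', 'address' by 'addr') are dropped.
import Mathlib
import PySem

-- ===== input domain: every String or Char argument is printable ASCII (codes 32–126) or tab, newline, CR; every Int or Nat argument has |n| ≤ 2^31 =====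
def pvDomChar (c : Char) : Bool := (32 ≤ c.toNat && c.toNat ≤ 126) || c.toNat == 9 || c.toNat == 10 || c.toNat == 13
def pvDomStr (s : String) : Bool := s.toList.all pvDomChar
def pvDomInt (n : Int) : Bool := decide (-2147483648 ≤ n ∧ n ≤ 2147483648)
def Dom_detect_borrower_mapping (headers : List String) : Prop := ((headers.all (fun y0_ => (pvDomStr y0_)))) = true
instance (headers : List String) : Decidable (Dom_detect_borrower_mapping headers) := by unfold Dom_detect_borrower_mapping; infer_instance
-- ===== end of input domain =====

-- B replaces A's header-major stateful loop + fallback block by a field-major table of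
-- (predicate, fallback index) scans; same values, simpler decomposition (objective: simpler).


-- ===== PORT A =====
-- the dict has five fixed literal keys; it is ported as a 5-tuple of Option String in key order
-- (card_id, ssn, bname, address, phone); each Python 'if' updates its one slot.
def dbmStep (m : Option String × Option String × Option String × Option String × Option String)
    (h : String) : Option String × Option String × Option String × Option String × Option String :=
  let hl := PySem.Str.lower h
  (if m.1.isNone && (PySem.Str.isIn "card" hl || hl == "id" || PySem.Str.isIn "id0" hl) then some h else m.1,
   if m.2.1.isNone && PySem.Str.isIn "ssn" hl then some h else m.2.1,
   if m.2.2.1.isNone && (PySem.Str.isIn "name" hl || PySem.Str.isIn "first_name" hl || PySem.Str.isIn "last_name" hl) then some h else m.2.2.1,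
   if m.2.2.2.1.isNone && (PySem.Str.isIn "address" hl || PySem.Str.isIn "addr" hl) then some h else m.2.2.2.1,
   if m.2.2.2.2.isNone && (PySem.Str.isIn "phone" hl || PySem.Str.isIn "tel" hl) then some h else m.2.2.2.2)

def detect_borrower_mapping (headers : List String) : List (String × Option String) :=
  let m := headers.foldl dbmStep (none, none, none, none, none)
  let c  := if m.1.isNone && decide (headers.length > 0) then PySem.List.pyGet? headers 0 else m.1
  let s  := if m.2.1.isNone && decide (headers.length > 1) then PySem.List.pyGet? headers 1 else m.2.1
  let b  := if m.2.2.1.isNone && decide (headers.length > 2) then PySem.List.pyGet? headers 2 else m.2.2.1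
  let ad := if m.2.2.2.1.isNone && decide (headers.length > 3) then PySem.List.pyGet? headers 3 else m.2.2.2.1
  let p  := if m.2.2.2.2.isNone && decide (headers.length > 4) then PySem.List.pyGet? headers 4 else m.2.2.2.2
  [("card_id", c), ("ssn", s), ("bname", b), ("address", ad), ("phone", p)]

-- ===== PORT B =====
-- first header whose lowercase form satisfies pred, else positional fallback headers[i] (None out of range)
def dbmPick (headers : List String) (pred : String → Bool) (i : Nat) : Option String :=
  (headers.find? (fun h => pred (PySem.Str.lower h))).orElse (fun _ => headers[i]?)

def detect_borrower_mapping_alt (headers : List String) : List (String × Option String) :=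
  [("card_id", dbmPick headers (fun hl => PySem.Str.isIn "card" hl || hl == "id" || PySem.Str.isIn "id0" hl) 0),
   ("ssn",     dbmPick headers (fun hl => PySem.Str.isIn "ssn" hl) 1),
   ("bname",   dbmPick headers (fun hl => PySem.Str.isIn "name" hl) 2),
   ("address", dbmPick headers (fun hl => PySem.Str.isIn "addr" hl) 3),
   ("phone",   dbmPick headers (fun hl => PySem.Str.isIn "phone" hl || PySem.Str.isIn "tel" hl) 4)]

-- ===== PRECONDITION & SPEC =====
def Spec_detect_borrower_mapping (headers : List String) (out : List (String × Option String)) : Prop := out = detect_borrower_mapping_alt headers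
instance (headers : List String) (out : List (String × Option String)) : Decidable (Spec_detect_borrower_mapping headers out) := by unfold Spec_detect_borrower_mapping; infer_instance

-- ===== CLAIM (what is proved, stated in full; the proofs are below) =====
def Claim_equal_detect_borrower_mapping : Prop := ∀ (headers : List String), Dom_detect_borrower_mapping headers → Spec_detect_borrower_mapping headers (detect_borrower_mapping headers)

-- ===== LEMMAS AND PROOFS =====

-- generic form of one loop slot and of the whole step
def dbmUpd (p : String → Bool) (o : Option String) (h : String) : Option String :=
  if o.isNone && p (PySem.Str.lower h) then some h else o

def dbmStep5 (p1 p2 p3 p4 p5 : String → Bool)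
    (m : Option String × Option String × Option String × Option String × Option String)
    (h : String) : Option String × Option String × Option String × Option String × Option String :=
  (dbmUpd p1 m.1 h, dbmUpd p2 m.2.1 h, dbmUpd p3 m.2.2.1 h, dbmUpd p4 m.2.2.2.1 h, dbmUpd p5 m.2.2.2.2 h)

lemma dbmStep_eq : dbmStep = dbmStep5
    (fun hl => PySem.Str.isIn "card" hl || hl == "id" || PySem.Str.isIn "id0" hl)
    (fun hl => PySem.Str.isIn "ssn" hl)
    (fun hl => PySem.Str.isIn "name" hl || PySem.Str.isIn "first_name" hl || PySem.Str.isIn "last_name" hl)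
    (fun hl => PySem.Str.isIn "address" hl || PySem.Str.isIn "addr" hl)
    (fun hl => PySem.Str.isIn "phone" hl || PySem.Str.isIn "tel" hl) := by
  funext m h
  rfl

lemma dbmUpd_orElse (p : String → Bool) (o : Option String) (h : String) (t : List String) :
    (dbmUpd p o h).orElse (fun _ => t.find? (fun x => p (PySem.Str.lower x)))
      = o.orElse (fun _ => (h :: t).find? (fun x => p (PySem.Str.lower x))) := by
  cases o <;> cases hp : p (PySem.Str.lower h) <;>
    simp [dbmUpd, hp, Option.orElse]

-- the fold computes, in each slot independently, acc-value-or-first-match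
lemma dbm_foldl (p1 p2 p3 p4 p5 : String → Bool) (hs : List String)
    (acc : Option String × Option String × Option String × Option String × Option String) :
    hs.foldl (dbmStep5 p1 p2 p3 p4 p5) acc =
      (acc.1.orElse (fun _ => hs.find? (fun x => p1 (PySem.Str.lower x))),
       acc.2.1.orElse (fun _ => hs.find? (fun x => p2 (PySem.Str.lower x))),
       acc.2.2.1.orElse (fun _ => hs.find? (fun x => p3 (PySem.Str.lower x))),
       acc.2.2.2.1.orElse (fun _ => hs.find? (fun x => p4 (PySem.Str.lower x))),
       acc.2.2.2.2.orElse (fun _ => hs.find? (fun x => p5 (PySem.Str.lower x)))) := by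
  induction hs generalizing acc with
  | nil =>
    obtain ⟨c, s, b, ad, p⟩ := acc
    cases c <;> cases s <;> cases b <;> cases ad <;> cases p <;> rfl
  | cons h t ih =>
    simp only [List.foldl_cons, ih]
    exact Prod.ext (dbmUpd_orElse _ _ _ _) (Prod.ext (dbmUpd_orElse _ _ _ _)
      (Prod.ext (dbmUpd_orElse _ _ _ _) (Prod.ext (dbmUpd_orElse _ _ _ _) (dbmUpd_orElse _ _ _ _))))

-- keyword subsumption: any superstring match implies the substring match
lemma isIn_mono (small big s : String) (hsub : small.toList <:+: big.toList)
    (h : PySem.Str.isIn big s = true) : PySem.Str.isIn small s = true := by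
  rw [PySem.Str.isIn_iff_infix] at *
  exact hsub.trans h

lemma pred_bname (hl : String) :
    (PySem.Str.isIn "name" hl || PySem.Str.isIn "first_name" hl || PySem.Str.isIn "last_name" hl)
      = PySem.Str.isIn "name" hl := by
  cases hn : PySem.Str.isIn "name" hl
  · cases h1 : PySem.Str.isIn "first_name" hl
    · cases h2 : PySem.Str.isIn "last_name" hl
      · rfl
      · have := isIn_mono "name" "last_name" hl (by decide) h2
        rw [hn] at this; exact Bool.noConfusion this
    · have := isIn_mono "name" "first_name" hl (by decide) h1
      rw [hn] at this; exact Bool.noConfusion this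
  · simp

lemma pred_addr (hl : String) :
    (PySem.Str.isIn "address" hl || PySem.Str.isIn "addr" hl) = PySem.Str.isIn "addr" hl := by
  cases ha : PySem.Str.isIn "addr" hl
  · cases h1 : PySem.Str.isIn "address" hl
    · rfl
    · have := isIn_mono "addr" "address" hl (by decide) h1
      rw [ha] at this; exact Bool.noConfusion this
  · simp

-- one field: A's match-then-guarded-fallback equals B's pick
lemma field_eq (hs : List String) (pred : String → Bool) (i : Nat) :
    (if (hs.find? (fun h => pred (PySem.Str.lower h))).isNone && decide (hs.length > i)
       then PySem.List.pyGet? hs (i : Int)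
       else hs.find? (fun h => pred (PySem.Str.lower h)))
      = dbmPick hs pred i := by
  simp only [dbmPick]
  cases hm : hs.find? (fun h => pred (PySem.Str.lower h))
  · by_cases hl : hs.length > i
    · simp [hl, Option.orElse]
    · have hg : hs[i]? = none := by
        rw [List.getElem?_eq_none_iff]; omega
      simp [hl, Option.orElse]
  · simp [Option.orElse]

-- ===== VERDICT (by name: the statement is the Claim_ definition above) =====
set_option maxHeartbeats 1000000 in
theorem detect_borrower_mapping_spec : Claim_equal_detect_borrower_mapping := by
  intro headers _
  unfold Spec_detect_borrower_mapping
  show detect_borrower_mapping headers = detect_borrower_mapping_alt headers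
  simp only [detect_borrower_mapping, detect_borrower_mapping_alt]
  rw [dbmStep_eq, dbm_foldl]
  simp only [Option.orElse, List.cons.injEq, Prod.mk.injEq, true_and, and_true]
  refine ⟨?_, ?_, ?_, ?_, ?_⟩
  · exact field_eq headers (fun hl => PySem.Str.isIn "card" hl || hl == "id" || PySem.Str.isIn "id0" hl) 0
  · exact field_eq headers (fun hl => PySem.Str.isIn "ssn" hl) 1
  · rw [show (fun x => PySem.Str.isIn "name" (PySem.Str.lower x) || PySem.Str.isIn "first_name" (PySem.Str.lower x) || PySem.Str.isIn "last_name" (PySem.Str.lower x))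
          = (fun x => PySem.Str.isIn "name" (PySem.Str.lower x)) from funext (fun x => pred_bname (PySem.Str.lower x))]
    exact field_eq headers (fun hl => PySem.Str.isIn "name" hl) 2
  · rw [show (fun x => PySem.Str.isIn "address" (PySem.Str.lower x) || PySem.Str.isIn "addr" (PySem.Str.lower x))
          = (fun x => PySem.Str.isIn "addr" (PySem.Str.lower x)) from funext (fun x => pred_addr (PySem.Str.lower x))]
    exact field_eq headers (fun hl => PySem.Str.isIn "addr" hl) 3
  · exact field_eq headers (fun hl => PySem.Str.isIn "phone" hl || PySem.Str.isIn "tel" hl) 4
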